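-- pv_equiv track=rewrite | github.com/hydrogeologger/hardware-datalogger | Project_Mainboard/Support/switches_biasing.py | get_common_resistor_value
-- ===== SOURCE A (Python) =====
-- import cmath, math
--
-- def get_common_resistor_value(Rx):
--     Rx = round(Rx)
--     resistors = [10, 12, 15, 18, 22, 27, 33, 39, 47, 56, 100, 120, 150, 180,\
--                 220, 270, 330, 390, 470, 560, 680, 820, 1e3, 1.2e3, 1.5e3,\
--                 1.8e3, 2.2e3, 2.7e3, 3.3e3, 3.9e3, 4.7e3, 5.6e3, 6.8e3,\
--                 8.2e3, 10e3, 12e3, 15e3, 18e3, 22e3, 27e3, 33e3, 39e3, 47e3,\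
--                 56e3, 68e3, 82e3, 100e3, 120e3, 150e3, 180e3, 220e3, 270e3,\
--                 330e3, 390e3, 470e3, 510e3, 560e3, 620e3, 680e3, 820e3, 1e6]
--
--     for i in range(0, len(resistors)-1):
--         if Rx == resistors[i]:
--             resistor_common_value_upper = resistors[i]
--             resistor_common_value_lower = resistor_common_value_upper
--             break
--         elif Rx > resistors[i]:
--             continue
--         elif Rx < resistors[i]:
--             resistor_common_value_lower = resistors[i-1]
--             resistor_common_value_upper = resistors[i]
--             # lower_p = Rx - resistors[i-1]
--             # upper_p = resistors[i] - Rx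
--             # if lower_p < upper_p:
--             #     resistor_common_value_lower = resistors[i-1]
--             # else:
--             #     resistor_common_value_upper = resistors[i]
--             break
--
--     return [math.trunc(resistor_common_value_lower), math.trunc(resistor_common_value_upper), Rx]
-- ===== SOURCE B (Python) =====
-- import math, bisect
--
-- def get_common_resistor_value(Rx):
--     Rx = round(Rx)
--     resistors = [10, 12, 15, 18, 22, 27, 33, 39, 47, 56, 100, 120, 150, 180,
--                 220, 270, 330, 390, 470, 560, 680, 820, 1e3, 1.2e3, 1.5e3,
--                 1.8e3, 2.2e3, 2.7e3, 3.3e3, 3.9e3, 4.7e3, 5.6e3, 6.8e3,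
--                 8.2e3, 10e3, 12e3, 15e3, 18e3, 22e3, 27e3, 33e3, 39e3, 47e3,
--                 56e3, 68e3, 82e3, 100e3, 120e3, 150e3, 180e3, 220e3, 270e3,
--                 330e3, 390e3, 470e3, 510e3, 560e3, 620e3, 680e3, 820e3, 1e6]
--     idx = bisect.bisect_left(resistors, Rx)
--     if idx < len(resistors) and resistors[idx] == Rx:
--         lower = upper = resistors[idx]
--     else:
--         lower = resistors[idx - 1]
--         upper = resistors[idx]
--     return [math.trunc(lower), math.trunc(upper), Rx]
-- ===== Notes on version B (the rewrite author's own statement) =====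
-- stated objective: idiomatic
-- what changed: Replaced A's linear scan over the resistor table (with break/continue and loop-carried result variables) by a bisect.bisect_left binary search that reads off the bracketing pair directly from the insertion index.
import Mathlib
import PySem

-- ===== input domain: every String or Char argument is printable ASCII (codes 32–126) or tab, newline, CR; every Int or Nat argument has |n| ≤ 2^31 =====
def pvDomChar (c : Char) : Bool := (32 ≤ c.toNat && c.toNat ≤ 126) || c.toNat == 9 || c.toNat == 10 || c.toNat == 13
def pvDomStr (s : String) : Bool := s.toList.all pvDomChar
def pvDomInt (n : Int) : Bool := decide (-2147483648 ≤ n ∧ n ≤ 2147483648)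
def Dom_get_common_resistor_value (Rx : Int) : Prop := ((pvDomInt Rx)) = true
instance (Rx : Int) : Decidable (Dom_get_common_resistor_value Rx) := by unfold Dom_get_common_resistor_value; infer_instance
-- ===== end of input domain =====

-- B replaces A's linear scan for the bracketing pair with a bisect_left binary search
-- (idiomatic use of the standard library; return value proved identical wherever A returns).

-- ===== PORT A =====
-- The resistor table, shared by both ports (all entries are integer-valued, so Python's math.trunc on them is the
-- identity and the list is ported as List Int; round(Rx) on a Python int is also the identity).
def resistorsA : List Int :=
  [10, 12, 15, 18, 22, 27, 33, 39, 47, 56, 100, 120, 150, 180,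
   220, 270, 330, 390, 470, 560, 680, 820, 1000, 1200, 1500,
   1800, 2200, 2700, 3300, 3900, 4700, 5600, 6800,
   8200, 10000, 12000, 15000, 18000, 22000, 27000, 33000, 39000, 47000,
   56000, 68000, 82000, 100000, 120000, 150000, 180000, 220000, 270000,
   330000, 390000, 470000, 510000, 560000, 620000, 680000, 820000, 1000000]

-- A's for-loop over i in range(0, len(resistors)-1) = 0..59: returns some (lower, upper) set
-- before `break`, or none when the loop falls through (Python then raises UnboundLocalError
-- at the return statement — those inputs are excluded by Pre_).
def aLoop (Rx : Int) (i : Nat) : Option (Int × Int) :=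
  if _h : i < 60 then
    let ri := PySem.List.pyGetD resistorsA (i : Int) 0   -- resistors[i], i always in range here
    if Rx = ri then some (ri, ri)
    else if Rx > ri then aLoop Rx (i + 1)                -- `continue`
    else some (PySem.List.pyGetD resistorsA ((i : Int) - 1) 0, ri)  -- resistors[i-1]: wraps to the last element when i = 0
  else none
termination_by 60 - i
decreasing_by omega

def get_common_resistor_value (Rx : Int) : List Int :=
  match aLoop Rx 0 with
  | some (l, u) => [l, u, Rx]
  | none => []   -- unreachable under Pre_: Python raises UnboundLocalError here

-- ===== PORT B =====
def get_common_resistor_value_alt (Rx : Int) : List Int :=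
  let idx := PySem.List.bisectLeft resistorsA Rx
  if idx < resistorsA.length ∧ PySem.List.pyGetD resistorsA (idx : Int) 0 = Rx then
    let r := PySem.List.pyGetD resistorsA (idx : Int) 0
    [r, r, Rx]
  else
    -- resistors[idx-1] (wraps when idx = 0) and resistors[idx]; idx ≤ 59 under Pre_, so both in range
    [PySem.List.pyGetD resistorsA ((idx : Int) - 1) 0,
     PySem.List.pyGetD resistorsA (idx : Int) 0, Rx]

-- ===== PRECONDITION & SPEC =====
-- Pre_ excludes exactly Rx > 820000 (= the last table entry the loop inspects): there A's loop
-- falls through with the result variables unassigned and Python raises UnboundLocalError.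
def Pre_get_common_resistor_value (Rx : Int) : Prop := Rx ≤ 820000
instance (Rx : Int) : Decidable (Pre_get_common_resistor_value Rx) := by
  unfold Pre_get_common_resistor_value; infer_instance

def pvWitness_get_common_resistor_value : Int := 47

def Spec_get_common_resistor_value (Rx : Int) (out : List Int) : Prop := out = get_common_resistor_value_alt Rx
instance (Rx : Int) (out : List Int) : Decidable (Spec_get_common_resistor_value Rx out) := by
  unfold Spec_get_common_resistor_value; infer_instance

-- ===== CLAIM (what is proved, stated in full; the proofs are below) =====
def Claim_equal_get_common_resistor_value : Prop := ∀ (Rx : Int), Dom_get_common_resistor_value Rx → Pre_get_common_resistor_value Rx → Spec_get_common_resistor_value Rx (get_common_resistor_value Rx)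


-- ===== LEMMAS AND PROOFS =====

lemma resistorsA_sorted : List.Pairwise (fun a b => a ≤ b) resistorsA := by decide

-- One unfolding of A's loop at the stopping index k (first index with Rx ≤ entry).
lemma aLoop_at_k (Rx : Int) (k : Nat) (hk : k ≤ 59)
    (hge : Rx ≤ resistorsA.getD k 0) :
    aLoop Rx k =
      (if Rx = resistorsA.getD k 0 then
        some (resistorsA.getD k 0, resistorsA.getD k 0)
      else
        some (PySem.List.pyGetD resistorsA ((k : Int) - 1) 0, resistorsA.getD k 0)) := by
  rw [aLoop]
  rw [dif_pos (show k < 60 by omega)]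
  simp only [PySem.List.pyGetD_natCast]
  by_cases hEq : Rx = resistorsA.getD k 0
  · rw [if_pos hEq, if_pos hEq]
  · rw [if_neg hEq, if_neg hEq, if_neg (show ¬ (Rx > resistorsA.getD k 0) from not_lt.mpr hge)]

-- Characterisation of A's loop: starting anywhere at i ≤ k it stops at k with the pair
-- A's branches build there.
lemma aLoop_eq (Rx : Int) (k : Nat) (hk : k ≤ 59)
    (hlt : ∀ j : Nat, j < k → resistorsA.getD j 0 < Rx)
    (hge : Rx ≤ resistorsA.getD k 0) :
    ∀ n i : Nat, k - i ≤ n → i ≤ k →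
      aLoop Rx i =
        (if Rx = resistorsA.getD k 0 then
          some (resistorsA.getD k 0, resistorsA.getD k 0)
        else
          some (PySem.List.pyGetD resistorsA ((k : Int) - 1) 0, resistorsA.getD k 0)) := by
  intro n
  induction n with
  | zero =>
    intro i hni hik
    have hik' : i = k := by omega
    subst hik'
    exact aLoop_at_k Rx i hk hge
  | succ n ih =>
    intro i hni hik
    by_cases hik' : i = k
    · subst hik'
      exact aLoop_at_k Rx i hk hge
    · have hlti : i < k := by omega
      have hri : resistorsA.getD i 0 < Rx := hlt i hlti
      rw [aLoop]
      rw [dif_pos (show i < 60 by omega)]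
      simp only [PySem.List.pyGetD_natCast]
      rw [if_neg (show ¬ Rx = resistorsA.getD i 0 by omega),
          if_pos (show Rx > resistorsA.getD i 0 from hri)]
      exact ih (i + 1) (by omega) (by omega)

-- ===== VERDICT (by name: the statement is the Claim_ definition above) =====
theorem get_common_resistor_value_spec : Claim_equal_get_common_resistor_value := by
  intro Rx _hdom hpre
  unfold Spec_get_common_resistor_value get_common_resistor_value get_common_resistor_value_alt
  set k := PySem.List.bisectLeft resistorsA Rx with hkdef
  obtain ⟨hlen, hlt', hge'⟩ := PySem.List.bisectLeft_spec resistorsA Rx resistorsA_sorted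
  have hlen61 : resistorsA.length = 61 := by decide
  have hgetD : ∀ (j : Nat) (hj : j < 61), resistorsA.getD j 0 = resistorsA[j]'(by omega) :=
    fun j hj => List.getD_eq_getElem _ _ (by omega)
  have hk59 : k ≤ 59 := by
    by_contra h
    have h59 : (59 : Nat) < resistorsA.length := by omega
    have h1 : resistorsA.getD 59 0 < Rx := by
      rw [hgetD 59 (by omega)]; exact hlt' 59 h59 (by omega)
    have h820 : resistorsA.getD 59 0 = 820000 := by decide
    unfold Pre_get_common_resistor_value at hpre
    omega
  have hlt : ∀ j : Nat, j < k → resistorsA.getD j 0 < Rx := by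
    intro j hj
    rw [hgetD j (by omega)]
    exact hlt' j (by omega) hj
  have hge : Rx ≤ resistorsA.getD k 0 := by
    rw [hgetD k (by omega)]
    exact hge' k (by omega) (le_refl k)
  have hA := aLoop_eq Rx k hk59 hlt hge k 0 (by omega) (by omega)
  by_cases hEq : Rx = resistorsA.getD k 0
  · have hcond : k < resistorsA.length ∧ PySem.List.pyGetD resistorsA (k : Int) 0 = Rx :=
      ⟨by omega, by rw [PySem.List.pyGetD_natCast]; exact hEq.symm⟩
    rw [hA, if_pos hEq, if_pos hcond]
    simp only [PySem.List.pyGetD_natCast]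
  · have hcond : ¬ (k < resistorsA.length ∧ PySem.List.pyGetD resistorsA (k : Int) 0 = Rx) := by
      rintro ⟨_, h⟩
      rw [PySem.List.pyGetD_natCast] at h
      exact hEq h.symm
    rw [hA, if_neg hEq, if_neg hcond]
    simp only [PySem.List.pyGetD_natCast]
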